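-- pv_equiv track=rewrite | github.com/raidos23/PyCompiler-ARK-Professional | acasl/tagging.py | compute_tag_order
-- ===== SOURCE A (Python) =====
-- from typing import Any
--
-- TAG_PRIORITY_MAP = {
--     # Phase 0: Nettoyage et hygiène des artefacts
--     "clean": 0,
--     "cleanup": 0,
--     "sanitize": 0,
--     "prune": 0,
--     "tidy": 0,
--
--     # Phase 1: Validation et vérification des artefacts
--     "validation": 10,
--     "verify": 10,
--     "check": 10,
--     "integrity": 10,
--
--     # Phase 2: Optimisation et post-traitement
--     "optimize": 20,
--     "optimization": 20,
--     "compress": 20,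
--     "strip": 20,
--     "minify": 20,
--
--     # Phase 3: Signature et sécurité
--     "sign": 30,
--     "signature": 30,
--     "security": 30,
--     "encrypt": 30,
--     "hash": 30,
--
--     # Phase 4: Packaging et distribution
--     "package": 40,
--     "packaging": 40,
--     "bundle": 40,
--     "archive": 40,
--     "zip": 40,
--
--     # Phase 5: Reporting et documentation
--     "report": 50,
--     "reporting": 50,
--     "stats": 50,
--     "statistics": 50,
--     "document": 50,
--     "log": 50,
-- }
--
-- DEFAULT_TAG_PRIORITY = 100
--
-- def compute_tag_order(meta_map: dict[str, dict[str, Any]]) -> list[str]: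
--     """Trie les plugins par score de tag (plus petit d'abord), puis par id.
--
--     Utilise TAG_PRIORITY_MAP pour déterminer la priorité basée sur les tags.
--     Tags pris depuis meta_map[pid]["tags"]. Inconnu => DEFAULT_TAG_PRIORITY.
--
--     Phases d'exécution post-compilation:
--     - 0: Nettoyage (clean, cleanup, sanitize)
--     - 10: Validation (check, verify, integrity)
--     - 20: Optimisation (optimize, compress, strip)
--     - 30: Signature (sign, security, encrypt)
--     - 40: Packaging (package, bundle, archive)
--     - 50: Reporting (report, stats, document)
--     - 100: Défaut (aucun tag reconnu)
--     """
--     def _compute_score(pid: str) -> int: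
--         """Calcule le score de priorité pour un plugin.
--
--         Retourne le score minimum parmi tous les tags du plugin.
--         Si aucun tag, retourne DEFAULT_TAG_PRIORITY.
--         """
--         try:
--             tags = meta_map.get(pid, {}).get("tags")
--             if not tags:
--                 return DEFAULT_TAG_PRIORITY
--
--             if not isinstance(tags, (list, tuple)):
--                 return DEFAULT_TAG_PRIORITY
--
--             # Normaliser les tags et trouver le score minimum
--             scores = []
--             for tag in tags:
--                 tag_str = str(tag).strip().lower()
--                 if tag_str:
--                     score = TAG_PRIORITY_MAP.get(tag_str, DEFAULT_TAG_PRIORITY)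
--                     scores.append(score)
--
--             return min(scores) if scores else DEFAULT_TAG_PRIORITY
--         except Exception:
--             return DEFAULT_TAG_PRIORITY
--
--     # Trier par (score, id) pour stabilité et lisibilité
--     return sorted(meta_map.keys(), key=lambda x: (_compute_score(x), x))
-- ===== SOURCE B (Python) =====
-- from typing import Any
--
-- TAG_PRIORITY_MAP = {
--     "clean": 0, "cleanup": 0, "sanitize": 0, "prune": 0, "tidy": 0,
--     "validation": 10, "verify": 10, "check": 10, "integrity": 10,
--     "optimize": 20, "optimization": 20, "compress": 20, "strip": 20, "minify": 20,
--     "sign": 30, "signature": 30, "security": 30, "encrypt": 30, "hash": 30,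
--     "package": 40, "packaging": 40, "bundle": 40, "archive": 40, "zip": 40,
--     "report": 50, "reporting": 50, "stats": 50, "statistics": 50, "document": 50, "log": 50,
-- }
--
-- DEFAULT_TAG_PRIORITY = 100
--
-- def compute_tag_order(meta_map: dict[str, dict[str, Any]]) -> list[str]:
--     """Bucket the plugin ids by tag-priority score (computed with a running
--     minimum instead of building a score list), then emit the buckets in
--     ascending score order, each bucket sorted lexicographically by id."""
--     def _score(pid: str) -> int:
--         try:
--             tags = meta_map.get(pid, {}).get("tags")
--             if not tags:
--                 return DEFAULT_TAG_PRIORITY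
--             if not isinstance(tags, (list, tuple)):
--                 return DEFAULT_TAG_PRIORITY
--             best = None
--             for tag in tags:
--                 t = str(tag).strip().lower()
--                 if t:
--                     s = TAG_PRIORITY_MAP.get(t, DEFAULT_TAG_PRIORITY)
--                     if best is None or s < best:
--                         best = s
--             return DEFAULT_TAG_PRIORITY if best is None else best
--         except Exception:
--             return DEFAULT_TAG_PRIORITY
--
--     buckets: dict[int, list[str]] = {}
--     for pid in meta_map.keys():
--         buckets.setdefault(_score(pid), []).append(pid)
--     out: list[str] = []
--     for score in sorted(buckets):
--         out.extend(sorted(buckets[score]))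
--     return out
-- ===== Notes on version B (the rewrite author's own statement) =====
-- stated objective: alternative
-- what changed: B replaces A's single comparison sort on the composite (score, id) key by grouping ids into per-score buckets in one pass and emitting the buckets in ascending score order with each bucket sorted by id, and computes each score with a running minimum instead of building a score list and taking min().
import Mathlib
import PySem

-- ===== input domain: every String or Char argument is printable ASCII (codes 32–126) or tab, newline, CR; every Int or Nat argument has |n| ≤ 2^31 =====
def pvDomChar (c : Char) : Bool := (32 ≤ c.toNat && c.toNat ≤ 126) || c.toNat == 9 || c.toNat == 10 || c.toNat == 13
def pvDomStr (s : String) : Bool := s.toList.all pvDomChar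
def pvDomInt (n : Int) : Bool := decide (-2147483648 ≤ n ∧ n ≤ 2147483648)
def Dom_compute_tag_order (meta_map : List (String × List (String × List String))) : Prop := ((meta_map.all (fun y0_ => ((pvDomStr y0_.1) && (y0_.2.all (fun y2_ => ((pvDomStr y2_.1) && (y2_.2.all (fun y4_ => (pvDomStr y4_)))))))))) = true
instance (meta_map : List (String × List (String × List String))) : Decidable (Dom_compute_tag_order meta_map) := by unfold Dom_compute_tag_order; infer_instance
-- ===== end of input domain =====

-- B replaces A's single composite-key sort by bucketing ids per score (emitting buckets in
-- ascending score order, each sorted by id) and computes scores by a running minimum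
-- instead of a score list + min() (alternative decomposition; same return value).

-- ===== PORT A =====
-- module-level constant TAG_PRIORITY_MAP used by A (assoc list, first match = dict lookup)
def pvTagPairs : List (String × Int) :=
  [("clean", 0), ("cleanup", 0), ("sanitize", 0), ("prune", 0), ("tidy", 0),
   ("validation", 10), ("verify", 10), ("check", 10), ("integrity", 10),
   ("optimize", 20), ("optimization", 20), ("compress", 20), ("strip", 20), ("minify", 20),
   ("sign", 30), ("signature", 30), ("security", 30), ("encrypt", 30), ("hash", 30),
   ("package", 40), ("packaging", 40), ("bundle", 40), ("archive", 40), ("zip", 40),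
   ("report", 50), ("reporting", 50), ("stats", 50), ("statistics", 50), ("document", 50), ("log", 50)]

-- A's _compute_score: build the list of scores, then min(scores)
def pvScore (meta_map : List (String × List (String × List String))) (pid : String) : Int :=
  -- tags = meta_map.get(pid, {}).get("tags")
  match (((meta_map.lookup pid).getD []).lookup "tags") with
  | none => 100                                   -- "if not tags" (None case)
  | some tags =>
    if tags = [] then 100                         -- "if not tags" (empty case)
    else
      -- isinstance(tags, (list, tuple)) is always true for this input type
      let scores := tags.foldl (fun acc tag =>
        let tagStr := PySem.Str.lower (PySem.Str.strip tag)
        if tagStr = "" then acc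
        else acc ++ [(pvTagPairs.lookup tagStr).getD 100]) []
      match PySem.List.min? scores (fun x => x) with
      | none => 100                               -- "min(scores) if scores else 100"
      | some m => m

-- sorted(meta_map.keys(), key=lambda x: (_compute_score(x), x)) — tuple key = lexicographic order
def compute_tag_order (meta_map : List (String × List (String × List String))) : List String :=
  PySem.List.sorted (meta_map.map Prod.fst)
    (fun x => toLex (pvScore meta_map x, x)) false

-- ===== PORT B =====
-- Source B's TAG_PRIORITY_MAP.get(t, DEFAULT_TAG_PRIORITY) on the literal constant dict
-- (no duplicate keys, so the chain of equality tests is exactly dict lookup with default)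
def pvTagScore (t : String) : Int :=
  if t == "clean" then 0 else if t == "cleanup" then 0 else if t == "sanitize" then 0
  else if t == "prune" then 0 else if t == "tidy" then 0
  else if t == "validation" then 10 else if t == "verify" then 10 else if t == "check" then 10
  else if t == "integrity" then 10
  else if t == "optimize" then 20 else if t == "optimization" then 20 else if t == "compress" then 20
  else if t == "strip" then 20 else if t == "minify" then 20
  else if t == "sign" then 30 else if t == "signature" then 30 else if t == "security" then 30
  else if t == "encrypt" then 30 else if t == "hash" then 30
  else if t == "package" then 40 else if t == "packaging" then 40 else if t == "bundle" then 40
  else if t == "archive" then 40 else if t == "zip" then 40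
  else if t == "report" then 50 else if t == "reporting" then 50 else if t == "stats" then 50
  else if t == "statistics" then 50 else if t == "document" then 50 else if t == "log" then 50
  else 100

-- Source B's _score: running minimum 'best' (None = not yet set) over the tags
def pvAltScore (meta_map : List (String × List (String × List String))) (pid : String) : Int :=
  match (((meta_map.lookup pid).getD []).lookup "tags") with
  | none => 100
  | some tags =>
    if tags = [] then 100
    else
      match tags.foldl (fun best tag =>
          let t := PySem.Str.lower (PySem.Str.strip tag)
          if t = "" then best
          else
            let s := pvTagScore t
            match best with
            | none => some s
            | some b => if s < b then some s else best) none with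
      | none => 100
      | some b => b

def compute_tag_order_alt (meta_map : List (String × List (String × List String))) : List String :=
  -- buckets.setdefault(_score(pid), []).append(pid)
  let buckets : PySem.Dict Int (List String) :=
    (meta_map.map Prod.fst).foldl
      (fun d pid =>
        let s := pvAltScore meta_map pid
        d.insert s ((d.getD s []) ++ [pid]))
      PySem.Dict.empty
  -- for score in sorted(buckets): out.extend(sorted(buckets[score]))
  (PySem.List.sorted buckets.keys (fun s => s) false).foldl
    (fun out s => out ++ PySem.List.sorted (buckets.getD s []) (fun x => x) false) []

-- ===== PRECONDITION & SPEC =====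
def Spec_compute_tag_order (meta_map : List (String × List (String × List String))) (out : List String) : Prop := out = compute_tag_order_alt meta_map
instance (meta_map : List (String × List (String × List String))) (out : List String) : Decidable (Spec_compute_tag_order meta_map out) := by unfold Spec_compute_tag_order; infer_instance

-- ===== CLAIM (what is proved, stated in full; the proofs are below) =====
def Claim_equal_compute_tag_order : Prop := ∀ (meta_map : List (String × List (String × List String))), Dom_compute_tag_order meta_map → Spec_compute_tag_order meta_map (compute_tag_order meta_map)

-- ===== LEMMAS AND PROOFS =====

-- dict lookup in the literal TAG_PRIORITY_MAP equals B's chain of equality tests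
set_option maxHeartbeats 1000000 in
theorem pv_lookup_eq_tagScore (t : String) :
    (pvTagPairs.lookup t).getD 100 = pvTagScore t := by
  by_cases h0 : t = "clean"
  · subst h0; rfl
  by_cases h1 : t = "cleanup"
  · subst h1; rfl
  by_cases h2 : t = "sanitize"
  · subst h2; rfl
  by_cases h3 : t = "prune"
  · subst h3; rfl
  by_cases h4 : t = "tidy"
  · subst h4; rfl
  by_cases h5 : t = "validation"
  · subst h5; rfl
  by_cases h6 : t = "verify"
  · subst h6; rfl
  by_cases h7 : t = "check"
  · subst h7; rfl
  by_cases h8 : t = "integrity"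
  · subst h8; rfl
  by_cases h9 : t = "optimize"
  · subst h9; rfl
  by_cases h10 : t = "optimization"
  · subst h10; rfl
  by_cases h11 : t = "compress"
  · subst h11; rfl
  by_cases h12 : t = "strip"
  · subst h12; rfl
  by_cases h13 : t = "minify"
  · subst h13; rfl
  by_cases h14 : t = "sign"
  · subst h14; rfl
  by_cases h15 : t = "signature"
  · subst h15; rfl
  by_cases h16 : t = "security"
  · subst h16; rfl
  by_cases h17 : t = "encrypt"
  · subst h17; rfl
  by_cases h18 : t = "hash"
  · subst h18; rfl
  by_cases h19 : t = "package"
  · subst h19; rfl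
  by_cases h20 : t = "packaging"
  · subst h20; rfl
  by_cases h21 : t = "bundle"
  · subst h21; rfl
  by_cases h22 : t = "archive"
  · subst h22; rfl
  by_cases h23 : t = "zip"
  · subst h23; rfl
  by_cases h24 : t = "report"
  · subst h24; rfl
  by_cases h25 : t = "reporting"
  · subst h25; rfl
  by_cases h26 : t = "stats"
  · subst h26; rfl
  by_cases h27 : t = "statistics"
  · subst h27; rfl
  by_cases h28 : t = "document"
  · subst h28; rfl
  by_cases h29 : t = "log"
  · subst h29; rfl
  have e0 : (t == "clean") = false := beq_eq_false_iff_ne.mpr h0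
  have e1 : (t == "cleanup") = false := beq_eq_false_iff_ne.mpr h1
  have e2 : (t == "sanitize") = false := beq_eq_false_iff_ne.mpr h2
  have e3 : (t == "prune") = false := beq_eq_false_iff_ne.mpr h3
  have e4 : (t == "tidy") = false := beq_eq_false_iff_ne.mpr h4
  have e5 : (t == "validation") = false := beq_eq_false_iff_ne.mpr h5
  have e6 : (t == "verify") = false := beq_eq_false_iff_ne.mpr h6
  have e7 : (t == "check") = false := beq_eq_false_iff_ne.mpr h7
  have e8 : (t == "integrity") = false := beq_eq_false_iff_ne.mpr h8
  have e9 : (t == "optimize") = false := beq_eq_false_iff_ne.mpr h9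
  have e10 : (t == "optimization") = false := beq_eq_false_iff_ne.mpr h10
  have e11 : (t == "compress") = false := beq_eq_false_iff_ne.mpr h11
  have e12 : (t == "strip") = false := beq_eq_false_iff_ne.mpr h12
  have e13 : (t == "minify") = false := beq_eq_false_iff_ne.mpr h13
  have e14 : (t == "sign") = false := beq_eq_false_iff_ne.mpr h14
  have e15 : (t == "signature") = false := beq_eq_false_iff_ne.mpr h15
  have e16 : (t == "security") = false := beq_eq_false_iff_ne.mpr h16
  have e17 : (t == "encrypt") = false := beq_eq_false_iff_ne.mpr h17
  have e18 : (t == "hash") = false := beq_eq_false_iff_ne.mpr h18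
  have e19 : (t == "package") = false := beq_eq_false_iff_ne.mpr h19
  have e20 : (t == "packaging") = false := beq_eq_false_iff_ne.mpr h20
  have e21 : (t == "bundle") = false := beq_eq_false_iff_ne.mpr h21
  have e22 : (t == "archive") = false := beq_eq_false_iff_ne.mpr h22
  have e23 : (t == "zip") = false := beq_eq_false_iff_ne.mpr h23
  have e24 : (t == "report") = false := beq_eq_false_iff_ne.mpr h24
  have e25 : (t == "reporting") = false := beq_eq_false_iff_ne.mpr h25
  have e26 : (t == "stats") = false := beq_eq_false_iff_ne.mpr h26
  have e27 : (t == "statistics") = false := beq_eq_false_iff_ne.mpr h27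
  have e28 : (t == "document") = false := beq_eq_false_iff_ne.mpr h28
  have e29 : (t == "log") = false := beq_eq_false_iff_ne.mpr h29
  simp only [pvTagPairs, pvTagScore, List.lookup, e0, e1, e2, e3, e4, e5, e6, e7, e8, e9, e10, e11, e12, e13, e14, e15, e16, e17, e18, e19, e20, e21, e22, e23, e24, e25, e26, e27, e28, e29]
  rfl

-- running minimum over an Option accumulator, as a fold over the produced score list
def pvOMin (b : Option Int) (l : List Int) : Option Int :=
  l.foldl (fun o s => match o with | none => some s | some x => if s < x then some s else o) b

theorem pvOMin_some : ∀ (l : List Int) (b : Int),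
    pvOMin (some b) l = some (l.foldl (fun x s => if s < x then s else x) b) := by
  intro l
  induction l with
  | nil => intro b; rfl
  | cons v vs ih =>
    intro b
    simp only [pvOMin, List.foldl_cons] at *
    by_cases h : v < b <;> simp [h, ih]

-- B's tag fold equals the option-min of A's produced score list
theorem pv_fold_omin :
    ∀ (tags : List String) (b : Option Int),
      tags.foldl (fun best tag =>
          let t := PySem.Str.lower (PySem.Str.strip tag)
          if t = "" then best
          else
            let s := pvTagScore t
            match best with
            | none => some s
            | some x => if s < x then some s else best) b
      = pvOMin b (tags.foldl (fun acc tag =>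
          let tagStr := PySem.Str.lower (PySem.Str.strip tag)
          if tagStr = "" then acc
          else acc ++ [(pvTagPairs.lookup tagStr).getD 100]) []) := by
  have key : ∀ (tags : List String) (b : Option Int) (acc : List Int),
      pvOMin b (tags.foldl (fun acc tag =>
          let tagStr := PySem.Str.lower (PySem.Str.strip tag)
          if tagStr = "" then acc
          else acc ++ [(pvTagPairs.lookup tagStr).getD 100]) acc)
      = (tags.foldl (fun best tag =>
          let t := PySem.Str.lower (PySem.Str.strip tag)
          if t = "" then best
          else
            let s := pvTagScore t
            match best with
            | none => some s
            | some x => if s < x then some s else best) (pvOMin b acc)) := by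
    intro tags
    induction tags with
    | nil => intro b acc; rfl
    | cons tag rest ih =>
      intro b acc
      simp only [List.foldl_cons]
      by_cases h : PySem.Str.lower (PySem.Str.strip tag) = ""
      · simp only [h]
        exact ih b acc
      · simp only [if_neg h]
        rw [ih b]
        congr 1
        -- pvOMin b (acc ++ [score]) = step (pvOMin b acc) with score = pvTagScore t
        rw [pv_lookup_eq_tagScore]
        simp [pvOMin]
  intro tags b
  have := key tags b []
  simpa [pvOMin] using this.symm

-- A's min(scores) equals the running-minimum fold on the same list
theorem pv_min_eq_omin (l : List Int) :
    (match PySem.List.min? l (fun x => x) with | none => (100 : Int) | some m => m)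
    = (match pvOMin none l with | none => (100 : Int) | some b => b) := by
  cases l with
  | nil => rfl
  | cons v vs =>
    rw [PySem.List.min?_id_cons]
    have : pvOMin none (v :: vs) = pvOMin (some v) vs := by simp [pvOMin]
    rw [this, pvOMin_some]
    have : vs.foldl (fun x s => if s < x then s else x) v = vs.foldl min v := by
      apply PySem.List.foldl_congr_mem
      intro x s _
      by_cases h : s < x
      · simp [h, min_eq_right (le_of_lt h)]
      · simp [h, min_eq_left (le_of_not_gt h)]
    simp [this]

-- the two scoring helpers agree
theorem pv_score_eq (meta_map : List (String × List (String × List String))) (pid : String) :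
    pvScore meta_map pid = pvAltScore meta_map pid := by
  unfold pvScore pvAltScore
  cases (((meta_map.lookup pid).getD []).lookup "tags") with
  | none => rfl
  | some tags =>
    by_cases h : tags = []
    · simp [h]
    · simp only [if_neg h]
      rw [pv_fold_omin tags none]
      exact pv_min_eq_omin _

-- the grouping fold returns, at each score, exactly the ids with that score, in input order
theorem pv_bucket_getD (f : String → Int) :
    ∀ (l : List String) (d : PySem.Dict Int (List String)) (s : Int),
      (l.foldl (fun d pid => let sc := f pid; d.insert sc ((d.getD sc []) ++ [pid])) d).getD s []
        = d.getD s [] ++ l.filter (fun x => f x == s) := by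
  intro l
  induction l with
  | nil => intro d s; simp
  | cons x xs ih =>
    intro d s
    simp only [List.foldl_cons, List.filter_cons]
    rw [ih]
    rw [PySem.Dict.getD_insert]
    by_cases h : f x = s
    · simp [h]
    · have h' : ¬ s = f x := fun hh => h hh.symm
      simp [h, h']

-- the keys of the grouping fold are the distinct scores, first occurrence order
theorem pv_bucket_keys (f : String → Int) (l : List String) :
    (l.foldl (fun d pid => let sc := f pid; d.insert sc ((d.getD sc []) ++ [pid]))
        (PySem.Dict.empty : PySem.Dict Int (List String))).keys
      = PySem.Set.ofList (l.map f) := by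
  have h := PySem.Dict.keys_foldl_insert_key l f
    (fun (d : PySem.Dict Int (List String)) pid => (d.getD (f pid) []) ++ [pid]) PySem.Dict.empty
  simpa [PySem.Set.ofList, PySem.Set.update, PySem.Dict.empty] using h

-- flatMap over distinct scores of the (sorted) per-score filters is a permutation of l
theorem pv_flatMap_perm (f : String → Int) :
    ∀ (ss : List Int), ss.Nodup → ∀ (l : List String), (∀ x ∈ l, f x ∈ ss) →
      (ss.flatMap (fun s => PySem.List.sorted (l.filter (fun x => f x == s)) (fun x => x) false)).Perm l := by
  intro ss
  induction ss with
  | nil =>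
    intro _ l hl
    cases l with
    | nil => simp
    | cons y ys => exact absurd (hl y (by simp)) (by simp)
  | cons s t ih =>
    intro hnd l hl
    have hsnott : s ∉ t := (List.nodup_cons.mp hnd).1
    have hndt : t.Nodup := (List.nodup_cons.mp hnd).2
    rw [List.flatMap_cons]
    have hcong : ∀ s' ∈ t,
        PySem.List.sorted (l.filter (fun x => f x == s')) (fun x => x) false
          = PySem.List.sorted ((l.filter (fun x => !(f x == s))).filter (fun x => f x == s')) (fun x => x) false := by
      intro s' hs'
      have hne : s' ≠ s := fun hh => hsnott (hh ▸ hs')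
      have : l.filter (fun x => f x == s') = (l.filter (fun x => !(f x == s))).filter (fun x => f x == s') := by
        rw [List.filter_filter]
        apply List.filter_congr
        intro x _
        by_cases hfx : f x = s'
        · simp [hfx, hne]
        · simp [hfx]
      rw [this]
    have hsub : ∀ x ∈ l.filter (fun x => !(f x == s)), f x ∈ t := by
      intro x hx
      have hmem := List.mem_filter.mp hx
      have := hl x hmem.1
      simp only [List.mem_cons] at this
      rcases this with h | h
      · exfalso
        have h2 := hmem.2
        simp [h] at h2
      · exact h
    have hperm := ih hndt (l.filter (fun x => !(f x == s))) hsub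
    rw [List.flatMap_congr hcong]
    exact (List.Perm.append (PySem.List.sorted_perm _ _ _) hperm).trans
      (List.filter_append_perm (fun x => f x == s) l)

-- the tuple key (score x, x) is injective
theorem pv_key_inj (f : String → Int) :
    Function.Injective (fun x : String => toLex (f x, x)) := by
  intro a b h
  have := toLex.injective h
  exact congrArg Prod.snd this

-- the concatenation of sorted buckets in ascending score order is sorted by the tuple key
theorem pv_flatMap_pairwise (f : String → Int) (ss : List Int) (hss : ss.Pairwise (· < ·)) (l : List String) :
    (ss.flatMap (fun s => PySem.List.sorted (l.filter (fun x => f x == s)) (fun x => x) false)).Pairwise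
      (fun a b => (toLex (f a, a) : Int ×ₗ String) ≤ toLex (f b, b)) := by
  rw [List.pairwise_flatMap]
  constructor
  · intro s _
    have hmemf : ∀ x ∈ PySem.List.sorted (l.filter (fun x => f x == s)) (fun x => x) false, f x = s := by
      intro x hx
      have := (PySem.List.mem_sorted _ _ _ _).mp hx
      simpa using (List.mem_filter.mp this).2
    refine (PySem.List.sorted_pairwise (l.filter (fun x => f x == s)) (fun x => x)).imp_of_mem ?_
    intro a b ha hb hab
    rw [Prod.Lex.toLex_le_toLex]
    exact Or.inr ⟨by rw [hmemf a ha, hmemf b hb], hab⟩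
  · refine hss.imp_of_mem ?_
    intro s1 s2 _ _ hlt x hx y hy
    have hfx : f x = s1 := by
      have := (PySem.List.mem_sorted _ _ _ _).mp hx
      simpa using (List.mem_filter.mp this).2
    have hfy : f y = s2 := by
      have := (PySem.List.mem_sorted _ _ _ _).mp hy
      simpa using (List.mem_filter.mp this).2
    rw [Prod.Lex.toLex_le_toLex]
    exact Or.inl (by rw [hfx, hfy]; exact hlt)

-- ===== VERDICT (by name: the statement is the Claim_ definition above) =====
theorem compute_tag_order_spec : Claim_equal_compute_tag_order := by
  intro meta_map _
  unfold Spec_compute_tag_order compute_tag_order compute_tag_order_alt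
  have hfeq : (fun x => toLex (pvScore meta_map x, x)) = (fun x => toLex (pvAltScore meta_map x, x)) := by
    funext x; rw [pv_score_eq]
  rw [hfeq]
  set f := pvAltScore meta_map with hf
  set l := meta_map.map Prod.fst with hl
  have hkeys := pv_bucket_keys f l
  have hgetD := pv_bucket_getD f l PySem.Dict.empty
  simp only [hkeys]
  set SS := PySem.List.sorted (PySem.Set.ofList (l.map f)) (fun s => s) false with hSS
  have hB : SS.foldl (fun out s => out ++ PySem.List.sorted
        ((l.foldl (fun d pid => let sc := f pid; d.insert sc ((d.getD sc []) ++ [pid]))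
          (PySem.Dict.empty : PySem.Dict Int (List String))).getD s []) (fun x => x) false) []
      = SS.flatMap (fun s => PySem.List.sorted (l.filter (fun x => f x == s)) (fun x => x) false) := by
    have := PySem.List.foldl_append_eq_flatMap
      (fun s => PySem.List.sorted
        ((l.foldl (fun d pid => let sc := f pid; d.insert sc ((d.getD sc []) ++ [pid]))
          (PySem.Dict.empty : PySem.Dict Int (List String))).getD s []) (fun x => x) false) SS []
    rw [this, List.nil_append]
    apply List.flatMap_congr
    intro s _
    rw [hgetD s]
    simp [PySem.Dict.getD, PySem.Dict.empty, PySem.Dict.get?]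
  rw [hB]
  have hpwlt : SS.Pairwise (· < ·) := PySem.List.sorted_ofList_pairwise_lt (l.map f)
  have hnd : SS.Nodup := hpwlt.imp (fun h => ne_of_lt h)
  have hcover : ∀ x ∈ l, f x ∈ SS := by
    intro x hx
    rw [hSS, PySem.List.mem_sorted, PySem.Set.mem_ofList]
    exact List.mem_map.mpr ⟨x, hx, rfl⟩
  have hperm := pv_flatMap_perm f SS hnd l hcover
  have hpw := pv_flatMap_pairwise f SS hpwlt l
  rw [PySem.List.sorted_eq_sorted_of_perm l
        (SS.flatMap (fun s => PySem.List.sorted (l.filter (fun x => f x == s)) (fun x => x) false))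
        (fun x => toLex (f x, x)) (pv_key_inj f) hperm.symm,
      PySem.List.sorted_eq_self_of_pairwise _ _ hpw]
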